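-- pv_equiv track=rewrite | github.com/CodeEnergy-Py/World-monitor | rss_parser.py | parse_forex_mentions
-- ===== SOURCE A (Python) =====
-- from typing import List, Dict, Any
--
-- def parse_forex_mentions(feed_content: List[Dict]) -> Dict[str, Any]:
--     """Extract Forex (currency) mentions from feeds"""
--     forex_data = {}
--     currency_pairs = ['EUR/USD', 'GBP/USD', 'USD/JPY', 'USD/CHF', 'AUD/USD', 'NZD/USD']
--
--     for article in feed_content:
--         title = article['title'].upper()
--
--         for pair in currency_pairs:
--             if pair.replace('/', '').upper() in title.replace('/', ''):
--                 if pair not in forex_data: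
--                     forex_data[pair] = []
--                 forex_data[pair].append(article)
--
--     return forex_data
-- ===== SOURCE B (Python) =====
-- def parse_forex_mentions(feed_content):
--     """Extract Forex (currency) mentions from feeds (pair-tagging decomposition)."""
--     currency_pairs = ['EUR/USD', 'GBP/USD', 'USD/JPY', 'USD/CHF', 'AUD/USD', 'NZD/USD']
--     tagged = [(article,
--                [p for p in currency_pairs
--                 if p.replace('/', '').upper() in article['title'].upper().replace('/', '')])
--               for article in feed_content]
--     order = list(dict.fromkeys(p for _, ps in tagged for p in ps))
--     return {p: [a for a, ps in tagged if p in ps] for p in order}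
-- ===== Notes on version B (the rewrite author's own statement) =====
-- stated objective: alternative
-- what changed: Replaces the incremental dict build (article-outer nested loop with membership-check-then-append) by a three-stage pipeline: tag each article once with its matching pairs, dedup the tag stream for key order, then build the dict pair-outer with one filter per key.
import Mathlib
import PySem

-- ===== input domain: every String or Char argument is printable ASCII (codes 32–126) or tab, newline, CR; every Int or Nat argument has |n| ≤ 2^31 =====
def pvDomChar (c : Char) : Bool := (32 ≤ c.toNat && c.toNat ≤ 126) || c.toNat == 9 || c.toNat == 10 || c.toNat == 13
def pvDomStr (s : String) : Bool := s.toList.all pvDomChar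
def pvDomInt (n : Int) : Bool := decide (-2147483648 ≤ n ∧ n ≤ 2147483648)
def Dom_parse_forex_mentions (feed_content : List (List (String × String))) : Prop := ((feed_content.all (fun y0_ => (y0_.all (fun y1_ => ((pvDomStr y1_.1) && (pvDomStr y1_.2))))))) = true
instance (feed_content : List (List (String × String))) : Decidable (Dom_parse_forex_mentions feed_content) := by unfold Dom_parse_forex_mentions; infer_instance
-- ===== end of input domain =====

-- B replaces A's incremental dict build by a tag/dedup/group pipeline (alternative decomposition,
-- same asymptotic cost); equivalence is about the return value only.


-- ===== PORT A =====
-- the currency-pair table, a literal shared by both Pythons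
def pvPairs : List String := ["EUR/USD", "GBP/USD", "USD/JPY", "USD/CHF", "AUD/USD", "NZD/USD"]

-- A: article-outer loop; the dict grows with a membership-check-then-append per matching pair.
def parse_forex_mentions (feed_content : List (List (String × String))) : List (String × List (List (String × String))) :=
  (feed_content.foldl
    (fun (fd : PySem.Dict String (List (List (String × String)))) article =>
      let title := PySem.Str.upper ((article.lookup "title").getD "")
      pvPairs.foldl
        (fun fd pair =>
          if PySem.Str.isIn (PySem.Str.upper (PySem.Str.replace pair "/" ""))
              (PySem.Str.replace title "/" "") then
            let fd1 := if fd.contains pair then fd else fd.insert pair []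
            fd1.modify pair [] (fun l => l ++ [article])
          else fd)
        fd)
    PySem.Dict.empty).items

-- ===== PORT B =====
-- B: tag every article once with its matching pairs, dedup the tag stream for key order,
-- then build the result pair-outer with one filter per key.
def parse_forex_mentions_alt (feed_content : List (List (String × String))) : List (String × List (List (String × String))) :=
  let tagged := feed_content.map (fun article =>
    (article, pvPairs.filter (fun p =>
      PySem.Str.isIn (PySem.Str.upper (PySem.Str.replace p "/" ""))
        (PySem.Str.replace (PySem.Str.upper ((article.lookup "title").getD "")) "/" ""))))
  let order := PySem.List.dedup (tagged.flatMap (fun ap => ap.2))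
  order.map (fun p => (p, (tagged.filter (fun ap => ap.2.contains p)).map Prod.fst))

-- ===== PRECONDITION & SPEC =====
-- Pre_ excludes exactly the feeds with an article lacking a "title" key, on which Python A raises KeyError.
def Pre_parse_forex_mentions (feed_content : List (List (String × String))) : Prop :=
  ∀ article ∈ feed_content, (article.lookup "title").isSome = true
instance (feed_content : List (List (String × String))) : Decidable (Pre_parse_forex_mentions feed_content) := by unfold Pre_parse_forex_mentions; infer_instance
def pvWitness_parse_forex_mentions : (List (List (String × String))) := ([[("title", "EUR/USD rallies"), ("link", "x")], [("title", "nothing here")]])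

def Spec_parse_forex_mentions (feed_content : List (List (String × String))) (out : List (String × List (List (String × String)))) : Prop := out = parse_forex_mentions_alt feed_content
instance (feed_content : List (List (String × String))) (out : List (String × List (List (String × String)))) : Decidable (Spec_parse_forex_mentions feed_content out) := by unfold Spec_parse_forex_mentions; infer_instance

-- ===== CLAIM (what is proved, stated in full; the proofs are below) =====
def Claim_equal_parse_forex_mentions : Prop := ∀ (feed_content : List (List (String × String))), Dom_parse_forex_mentions feed_content → Pre_parse_forex_mentions feed_content → Spec_parse_forex_mentions feed_content (parse_forex_mentions feed_content)

-- ===== LEMMAS AND PROOFS =====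

-- the match predicate both Pythons test, and the per-article tag
def pvHit (article : List (String × String)) (p : String) : Bool :=
  PySem.Str.isIn (PySem.Str.upper (PySem.Str.replace p "/" ""))
    (PySem.Str.replace (PySem.Str.upper ((article.lookup "title").getD "")) "/" "")
def pvTag (article : List (String × String)) : List String := pvPairs.filter (pvHit article)
def pvAdd (fd : PySem.Dict String (List (List (String × String)))) (article : List (String × String)) (p : String) : PySem.Dict String (List (List (String × String))) :=
  (if fd.contains p then fd else fd.insert p []).modify p [] (fun l => l ++ [article])
def pvKeys (l : List (List (String × String))) : List String := PySem.List.dedup (l.flatMap pvTag)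
def pvArts (l : List (List (String × String))) (p : String) : List (List (String × String)) :=
  l.filter (fun a => (pvTag a).contains p)
def pvDict (l : List (List (String × String))) : PySem.Dict String (List (List (String × String))) :=
  ⟨(pvKeys l).map (fun p => (p, pvArts l p))⟩


theorem pvKeys_pvDict (l : List (List (String × String))) : (pvDict l).keys = pvKeys l := by
  simp [PySem.Dict.keys, pvDict, Function.comp_def]

theorem pvNodup_keys_pvDict (l : List (List (String × String))) : (pvDict l).keys.Nodup := by
  rw [pvKeys_pvDict]
  simp [pvKeys, PySem.List.dedup_eq_ofList, PySem.Set.nodup_ofList]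

theorem pvContains_pvAdd (d : PySem.Dict String (List (List (String × String)))) (a : List (String × String)) (p x : String) :
    (pvAdd d a p).contains x = (x == p || d.contains x) := by
  unfold pvAdd PySem.Dict.modify
  by_cases h : d.contains p
  · simp [h, PySem.Dict.contains_insert]
  · simp [h, PySem.Dict.contains_insert]

theorem pvNodup_keys_pvAdd (d : PySem.Dict String (List (List (String × String)))) (a : List (String × String)) (p : String) (hnd : d.keys.Nodup) :
    (pvAdd d a p).keys.Nodup := by
  unfold pvAdd PySem.Dict.modify
  apply PySem.Dict.nodup_keys_insert
  split
  · exact hnd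
  · exact PySem.Dict.nodup_keys_insert _ _ _ hnd

theorem pvItems_pvAdd (d : PySem.Dict String (List (List (String × String)))) (a : List (String × String)) (p : String) (hnd : d.keys.Nodup) :
    (pvAdd d a p).items =
      if d.contains p then d.items.map (fun q => if q.1 == p then (p, q.2 ++ [a]) else q)
      else d.items ++ [(p, [a])] := by
  unfold pvAdd PySem.Dict.modify
  by_cases h : d.contains p
  · simp only [h, if_true]
    rw [PySem.Dict.items_insert_of_contains _ _ h]
    apply List.map_congr_left
    intro q hq
    by_cases hqp : (q.1 == p)
    · simp only [hqp, if_true]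
      have hb : q.1 = p := by exact eq_of_beq hqp
      have : d.get? q.1 = some q.2 := PySem.Dict.get?_of_mem_items _ (by exact (Prod.mk.eta ▸ hq)) hnd
      rw [hb] at this
      rw [PySem.Dict.getD_eq_get?_getD, this]
      rfl
    · simp [hqp]
  · simp only [h, Bool.false_eq_true, if_false]
    have h1 : (d.insert p ([] : List (List (String × String)))).contains p := PySem.Dict.contains_insert_self _ _ _
    rw [PySem.Dict.items_insert_of_contains _ _ h1]
    rw [PySem.Dict.getD_insert_self]
    rw [PySem.Dict.items_insert_of_not_contains _ _ (by simp [h])]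
    rw [List.map_append]
    have hnp : ∀ q ∈ d.items, (q.1 == p) = false := by
      intro q hq
      by_contra hc
      have : d.contains p = true := by
        simp only [PySem.Dict.contains, List.any_eq_true]
        exact ⟨q, hq, by simpa using hc⟩
      simp [this] at h
    congr 1
    · conv_rhs => rw [← List.map_id d.items]
      apply List.map_congr_left
      intro q hq
      simp [hnp q hq]
    · simp

theorem pvFoldl_pvAdd (a : List (String × String)) (ps : List String) :
    ∀ (d : PySem.Dict String (List (List (String × String)))), ps.Nodup → d.keys.Nodup →
    (ps.foldl (fun d p => pvAdd d a p) d).items =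
      d.items.map (fun q => if ps.contains q.1 then (q.1, q.2 ++ [a]) else q)
      ++ (ps.filter (fun p => !d.contains p)).map (fun p => (p, [a])) := by
  induction ps with
  | nil => intro d _ _; simp
  | cons p ps ih =>
    intro d hps hnd
    have hpnotin : p ∉ ps := (List.nodup_cons.mp hps).1
    have hps' : ps.Nodup := (List.nodup_cons.mp hps).2
    simp only [List.foldl_cons]
    rw [ih (pvAdd d a p) hps' (pvNodup_keys_pvAdd d a p hnd)]
    have hfilt : ps.filter (fun x => !(pvAdd d a p).contains x)
        = ps.filter (fun x => !((x == p) || d.contains x)) := by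
      apply List.filter_congr
      intro x _
      rw [pvContains_pvAdd]
    rw [pvItems_pvAdd d a p hnd, hfilt]
    by_cases h : d.contains p
    · simp only [h, if_true]
      have hfilt2 : ps.filter (fun x => !((x == p) || d.contains x))
          = ps.filter (fun x => !d.contains x) := by
        apply List.filter_congr
        intro x hx
        have : (x == p) = false := by
          simp only [beq_eq_false_iff_ne, ne_eq]
          intro he; exact hpnotin (he ▸ hx)
        simp [this]
      rw [hfilt2, List.map_map]
      have hmap : ∀ q : String × List (List (String × String)),
          ((fun q => if ps.contains q.1 then (q.1, q.2 ++ [a]) else q) ∘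
            (fun q => if q.1 == p then (p, q.2 ++ [a]) else q)) q
          = (fun q => if (p :: ps).contains q.1 then (q.1, q.2 ++ [a]) else q) q := by
        intro q
        by_cases hqp : (q.1 == p)
        · have hq1 : q.1 = p := eq_of_beq hqp
          have hc : ps.contains p = false := by
            simp only [List.contains_eq_mem, decide_eq_false_iff_not]
            exact hpnotin
          simp [hq1]
          exact hpnotin
        · simp only [Function.comp_apply, hqp]
          simp only [Bool.false_eq_true, if_false]
          have : ((p :: ps).contains q.1) = ps.contains q.1 := by
            simp only [List.contains_cons, hqp]
            simp
          rw [this]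
      rw [List.map_congr_left (fun q _ => hmap q)]
      have hfc : (p :: ps).filter (fun x => !d.contains x) = ps.filter (fun x => !d.contains x) := by
        simp [h]
      rw [hfc]
    · simp only [h, Bool.false_eq_true, if_false]
      have hnp : ∀ q ∈ d.items, (q.1 == p) = false := by
        intro q hq
        by_contra hc
        have : d.contains p = true := by
          simp only [PySem.Dict.contains, List.any_eq_true]
          exact ⟨q, hq, by simpa using hc⟩
        simp [this] at h
      have hfilt2 : ps.filter (fun x => !((x == p) || d.contains x))
          = ps.filter (fun x => !d.contains x) := by
        apply List.filter_congr
        intro x hx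
        have : (x == p) = false := by
          simp only [beq_eq_false_iff_ne, ne_eq]
          intro he; exact hpnotin (he ▸ hx)
        simp [this]
      rw [hfilt2, List.map_append]
      have hpsp : ps.contains p = false := by
        simp only [List.contains_eq_mem, decide_eq_false_iff_not]
        exact hpnotin
      have hmap1 : d.items.map (fun q => if ps.contains q.1 then (q.1, q.2 ++ [a]) else q)
          = d.items.map (fun q => if (p :: ps).contains q.1 then (q.1, q.2 ++ [a]) else q) := by
        apply List.map_congr_left
        intro q hq
        have : ((p :: ps).contains q.1) = ps.contains q.1 := by
          simp only [List.contains_cons, hnp q hq]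
          simp
        rw [this]
      rw [hmap1]
      have hfc : (p :: ps).filter (fun x => !d.contains x) = p :: ps.filter (fun x => !d.contains x) := by
        simp [h]
      rw [hfc]
      simp [List.append_assoc]
      exact hpnotin

theorem pvArts_concat (pre : List (List (String × String))) (a : List (String × String)) (p : String) :
    pvArts (pre ++ [a]) p = pvArts pre p ++ (if (pvTag a).contains p then [a] else []) := by
  by_cases h : p ∈ pvTag a <;>
    simp [pvArts, List.filter_append, List.contains_eq_mem, h]

theorem pvContains_pvDict (l : List (List (String × String))) (x : String) :
    (pvDict l).contains x = (pvKeys l).contains x := by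
  rw [PySem.Dict.contains_eq_decide_mem_keys, pvKeys_pvDict, List.contains_eq_mem]

theorem pvKeys_concat (pre : List (List (String × String))) (a : List (String × String)) :
    pvKeys (pre ++ [a]) = pvKeys pre ++ (pvTag a).filter (fun y => !((pvKeys pre).contains y)) := by
  have htagnd : (pvTag a).Nodup := List.Nodup.filter _ (by decide : pvPairs.Nodup)
  unfold pvKeys
  rw [List.flatMap_append]
  simp only [List.flatMap_cons, List.flatMap_nil, List.append_nil]
  rw [PySem.List.dedup_eq_ofList, PySem.List.dedup_eq_ofList, PySem.Set.ofList_append,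
    PySem.Set.update_eq_append_filter, PySem.Set.ofList_eq_self_of_nodup _ htagnd]
  simp [PySem.Set.contains_eq_listContains]

set_option maxHeartbeats 400000 in
theorem pvStep_eq (pre : List (List (String × String))) (a : List (String × String)) :
    (pvTag a).foldl (fun d p => pvAdd d a p) (pvDict pre) = pvDict (pre ++ [a]) := by
  apply PySem.Dict.ext
  have htagnd : (pvTag a).Nodup := List.Nodup.filter _ (by decide : pvPairs.Nodup)
  rw [pvFoldl_pvAdd a (pvTag a) (pvDict pre) htagnd (pvNodup_keys_pvDict pre)]
  have hitems : (pvDict pre).items = (pvKeys pre).map (fun p => (p, pvArts pre p)) := rfl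
  have hitems2 : (pvDict (pre ++ [a])).items = (pvKeys (pre ++ [a])).map (fun p => (p, pvArts (pre ++ [a]) p)) := rfl
  rw [hitems, hitems2, pvKeys_concat, List.map_append, List.map_map]
  have h1 : (pvKeys pre).map ((fun q : String × List (List (String × String)) =>
        if (pvTag a).contains q.1 then (q.1, q.2 ++ [a]) else q) ∘ (fun p => (p, pvArts pre p)))
      = (pvKeys pre).map (fun p => (p, pvArts (pre ++ [a]) p)) := by
    apply List.map_congr_left
    intro p _
    simp only [Function.comp_apply]
    rw [pvArts_concat]
    by_cases h : p ∈ pvTag a <;> simp [List.contains_eq_mem, h]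
  have h2 : ((pvTag a).filter (fun p => !(pvDict pre).contains p)).map (fun p => (p, [a]))
      = ((pvTag a).filter (fun y => !((pvKeys pre).contains y))).map (fun p => (p, pvArts (pre ++ [a]) p)) := by
    have hcond : (pvTag a).filter (fun p => !(pvDict pre).contains p)
        = (pvTag a).filter (fun y => !((pvKeys pre).contains y)) := by
      apply List.filter_congr
      intro x _
      rw [pvContains_pvDict]
    rw [hcond]
    apply List.map_congr_left
    intro p hp
    have hmem := List.mem_filter.mp hp
    have hptag : p ∈ pvTag a := hmem.1
    have hpnot : ((pvKeys pre).contains p) = false := by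
      have := hmem.2
      simpa using this
    have hempty : pvArts pre p = [] := by
      simp only [pvArts, List.filter_eq_nil_iff]
      intro x hx hc
      have hpx : p ∈ pre.flatMap pvTag := List.mem_flatMap.mpr ⟨x, hx, by simpa using hc⟩
      have hmemk : p ∈ pvKeys pre := by
        unfold pvKeys
        rw [PySem.List.dedup_eq_ofList]
        exact (PySem.Set.mem_ofList _ _).mpr hpx
      rw [List.contains_eq_mem] at hpnot
      simp [hmemk] at hpnot
    rw [pvArts_concat, hempty]
    simp [List.contains_eq_mem, hptag]
  rw [h1, h2]

theorem pvFold_eq (l : List (List (String × String))) :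
    ∀ (pre : List (List (String × String))),
    (l.foldl
      (fun fd a => pvPairs.foldl (fun fd p => if pvHit a p then pvAdd fd a p else fd) fd)
      (pvDict pre)) = pvDict (pre ++ l) := by
  induction l with
  | nil => intro pre; simp
  | cons a l ih =>
    intro pre
    simp only [List.foldl_cons]
    have hstep : pvPairs.foldl (fun fd p => if pvHit a p then pvAdd fd a p else fd) (pvDict pre)
        = pvDict (pre ++ [a]) := by
      rw [← List.foldl_filter]
      exact pvStep_eq pre a
    rw [hstep, ih (pre ++ [a]), List.append_assoc]
    rfl

theorem pvA_eq (feed : List (List (String × String))) :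
    parse_forex_mentions feed = (pvDict feed).items := by
  have h := pvFold_eq feed []
  simp only [List.nil_append] at h
  show (feed.foldl
      (fun fd a => pvPairs.foldl (fun fd p => if pvHit a p then pvAdd fd a p else fd) fd)
      (pvDict [])).items = _
  rw [h]

theorem pvB_eq (feed : List (List (String × String))) :
    parse_forex_mentions_alt feed = (pvDict feed).items := by
  have hfun : (fun article : List (String × String) => (article, pvPairs.filter (fun p =>
        PySem.Str.isIn (PySem.Str.upper (PySem.Str.replace p "/" ""))
          (PySem.Str.replace (PySem.Str.upper ((article.lookup "title").getD "")) "/" ""))))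
      = (fun a => (a, pvTag a)) := rfl
  unfold parse_forex_mentions_alt
  simp only [hfun]
  have hr : (pvDict feed).items = (pvKeys feed).map (fun p => (p, pvArts feed p)) := rfl
  rw [hr, List.flatMap_map]
  simp only [pvKeys]
  apply List.map_congr_left
  intro p _
  rw [List.filter_map, List.map_map]
  simp [pvArts, Function.comp_def]

-- ===== VERDICT (by name: the statement is the Claim_ definition above) =====
theorem parse_forex_mentions_spec : Claim_equal_parse_forex_mentions := by
  intro feed _ _
  unfold Spec_parse_forex_mentions
  rw [pvA_eq, pvB_eq]
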